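-- pv_equiv track=rewrite | github.com/KellieGrieneisen/Code-Challenges | matching_socks.py | sockMerchant
-- ===== SOURCE A (Python) =====
-- import math
--
-- def sockMerchant(n, ar):
--     # Write your code here
--     pairs=[]
--     seen=[]
--     count=0
--     x=0
--     while x in range(0,len(ar)):
--         for num in ar:
--             count = ar.count(num)
--
--             if num not in seen:
--                 pairs.append(math.floor(count/2))
--                 seen.append(num)
--             x=x+1
--
--             if x==len(ar):
--                 return sum(pairs)
--
--     return sum(pairs)
-- ===== SOURCE B (Python) =====
-- def sockMerchant(n, ar):
--     unpaired = set()
--     count = 0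
--     for sock in ar:
--         if sock in unpaired:
--             unpaired.remove(sock)
--             count += 1
--         else:
--             unpaired.add(sock)
--     return count
-- ===== Notes on version B (the rewrite author's own statement) =====
-- stated objective: faster
-- what changed: Replaces the nested while/for with repeated ar.count scans and a pairs/seen list pair by a single pass maintaining a set of currently-unmatched socks and a running pair counter.
import Mathlib
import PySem

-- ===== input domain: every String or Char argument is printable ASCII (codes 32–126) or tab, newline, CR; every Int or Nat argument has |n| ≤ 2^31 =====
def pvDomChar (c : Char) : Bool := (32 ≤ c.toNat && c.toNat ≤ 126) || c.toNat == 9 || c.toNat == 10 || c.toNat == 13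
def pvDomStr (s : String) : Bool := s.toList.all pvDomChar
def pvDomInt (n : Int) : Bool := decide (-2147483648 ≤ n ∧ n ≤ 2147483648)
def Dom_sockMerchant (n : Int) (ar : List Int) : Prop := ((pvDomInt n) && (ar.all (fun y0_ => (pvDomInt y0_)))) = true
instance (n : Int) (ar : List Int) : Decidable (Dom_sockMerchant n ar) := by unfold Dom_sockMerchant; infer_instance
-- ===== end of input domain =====

-- B replaces A's nested while/for with repeated ar.count scans by a single pass over ar
-- maintaining a set of currently-unmatched socks and a running pair counter (faster rewrite).

-- ===== PORT A =====
-- One pass of A's inner `for num in ar` loop.  In the `[]` case the for-loop is exhausted: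
-- there x = x0 + len(ar) ≥ len(ar) lies outside range(0, len(ar)), so the while exits and
-- A returns sum(pairs); mid-loop, `if x == len(ar): return sum(pairs)`.
def pvForA (ar : List Int) : List Int → List Int → List Int → Int → Int
  | [], pairs, _, _ => pairs.sum
  | num :: rest, pairs, seen, x =>
    let count : Int := (PySem.List.count ar num : Int)
    -- math.floor(count/2) on these nonnegative ints is count // 2
    let pairs' := if seen.contains num then pairs else pairs ++ [PySem.Int.floordiv count 2]
    let seen' := if seen.contains num then seen else seen ++ [num]
    let x' := x + 1
    if x' = (ar.length : Int) then pairs'.sum else pvForA ar rest pairs' seen' x'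

def sockMerchant (n : Int) (ar : List Int) : Int :=
  -- `while x in range(0, len(ar))` with x = 0: entered iff 0 < len(ar)
  if 0 < ar.length then pvForA ar ar [] [] 0 else ([] : List Int).sum

-- ===== PORT B =====
def pvLoopB : List Int → PySem.Set Int → Int → Int
  | [], _, count => count
  | sock :: rest, unpaired, count =>
    if unpaired.contains sock then
      -- unpaired.remove(sock) on a present element = discard
      pvLoopB rest (unpaired.discard sock) (count + 1)
    else
      pvLoopB rest (unpaired.add sock) count

def sockMerchant_alt (n : Int) (ar : List Int) : Int :=
  pvLoopB ar PySem.Set.empty 0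

-- ===== PRECONDITION & SPEC =====
def Spec_sockMerchant (n : Int) (ar : List Int) (out : Int) : Prop := out = sockMerchant_alt n ar
instance (n : Int) (ar : List Int) (out : Int) : Decidable (Spec_sockMerchant n ar out) := by unfold Spec_sockMerchant; infer_instance

-- ===== CLAIM (what is proved, stated in full; the proofs are below) =====
def Claim_equal_sockMerchant : Prop := ∀ (n : Int) (ar : List Int), Dom_sockMerchant n ar → Spec_sockMerchant n ar (sockMerchant n ar)

-- ===== LEMMAS AND PROOFS =====

-- first occurrences of l that are not in seen (A's `seen` bookkeeping, abstracted)
def pvFirsts : List Int → List Int → List Int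
  | [], _ => []
  | a :: rest, seen => if a ∈ seen then pvFirsts rest seen else a :: pvFirsts rest (seen ++ [a])

lemma mem_pvFirsts (v : Int) : ∀ (l seen : List Int), v ∈ pvFirsts l seen ↔ v ∈ l ∧ v ∉ seen := by
  intro l
  induction l with
  | nil => simp [pvFirsts]
  | cons a rest ih =>
    intro seen
    simp only [pvFirsts]
    by_cases h : a ∈ seen
    · rw [if_pos h, ih]
      simp only [List.mem_cons]
      constructor
      · rintro ⟨hm, hn⟩; exact ⟨Or.inr hm, hn⟩
      · rintro ⟨hm | hm, hn⟩
        · subst hm; exact absurd h hn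
        · exact ⟨hm, hn⟩
    · rw [if_neg h]
      simp only [List.mem_cons, ih, List.mem_append, List.mem_singleton]
      constructor
      · rintro (rfl | ⟨hm, hn⟩)
        · exact ⟨Or.inl rfl, h⟩
        · exact ⟨Or.inr hm, fun hv => hn (Or.inl hv)⟩
      · rintro ⟨rfl | hm, hn⟩
        · exact Or.inl rfl
        · rcases eq_or_ne v a with rfl | hva
          · exact Or.inl rfl
          · exact Or.inr ⟨hm, fun hv => hv.elim hn (fun hv2 => by simp at hv2; exact hva hv2)⟩

lemma nodup_pvFirsts : ∀ (l seen : List Int), (pvFirsts l seen).Nodup := by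
  intro l
  induction l with
  | nil => intro seen; simp [pvFirsts]
  | cons a rest ih =>
    intro seen
    simp only [pvFirsts]
    by_cases h : a ∈ seen
    · rw [if_pos h]; exact ih seen
    · rw [if_neg h]
      refine List.nodup_cons.mpr ⟨fun hm => ?_, ih _⟩
      rw [mem_pvFirsts] at hm
      exact hm.2 (by simp)

-- A's per-element entry: count(ar, v) // 2
def pvEntry (ar : List Int) (v : Int) : Int := PySem.Int.floordiv ((PySem.List.count ar v : Int)) 2

lemma pvForA_eq (ar : List Int) : ∀ (items pairs seen : List Int) (x : Int),
    x + (items.length : Int) = (ar.length : Int) →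
    pvForA ar items pairs seen x = pairs.sum + ((pvFirsts items seen).map (pvEntry ar)).sum := by
  intro items
  induction items with
  | nil => intro pairs seen x _; simp [pvForA, pvFirsts]
  | cons num rest ih =>
    intro pairs seen x hx
    simp only [pvForA, List.contains_iff_mem]
    by_cases h : num ∈ seen
    · simp only [h, decide_true, ite_true]
      by_cases hr : rest = []
      · subst hr
        have hx1 : x + 1 = (ar.length : Int) := by simp at hx; omega
        rw [if_pos hx1]
        simp [pvFirsts, h]
      · have hx1 : ¬ (x + 1 = (ar.length : Int)) := by
          have : 0 < rest.length := List.length_pos_of_ne_nil hr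
          simp at hx; omega
        rw [if_neg hx1, ih _ _ _ (by simp at hx ⊢; omega)]
        simp [pvFirsts, h]
    · simp only [h, decide_false, Bool.false_eq_true, ite_false]
      by_cases hr : rest = []
      · subst hr
        have hx1 : x + 1 = (ar.length : Int) := by simp at hx; omega
        rw [if_pos hx1]
        simp [pvFirsts, h, pvEntry]
      · have hx1 : ¬ (x + 1 = (ar.length : Int)) := by
          have : 0 < rest.length := List.length_pos_of_ne_nil hr
          simp at hx; omega
        rw [if_neg hx1, ih _ _ _ (by simp at hx ⊢; omega)]
        simp [pvFirsts, h, pvEntry, add_assoc]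

lemma sockMerchant_val (n : Int) (ar : List Int) :
    sockMerchant n ar = ((pvFirsts ar []).map (pvEntry ar)).sum := by
  unfold sockMerchant
  by_cases h : 0 < ar.length
  · rw [if_pos h, pvForA_eq ar ar [] [] 0 (by omega)]; simp
  · rw [if_neg h]
    have hnil : ar = [] := by
      cases ar with
      | nil => rfl
      | cons a l => simp at h
    subst hnil; simp [pvFirsts]

-- B side: the set of unpaired socks after toggling every sock of l into s
def pvTog : List Int → PySem.Set Int → PySem.Set Int
  | [], s => s
  | a :: l, s => pvTog l (if a ∈ s then s.discard a else s.add a)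

lemma nodup_pvTog : ∀ (l : List Int) (s : PySem.Set Int), s.Nodup → (pvTog l s).Nodup := by
  intro l
  induction l with
  | nil => intro s hs; exact hs
  | cons a l ih =>
    intro s hs
    simp only [pvTog]
    by_cases h : a ∈ s
    · rw [if_pos h]; exact ih _ (PySem.Set.nodup_discard s a hs)
    · rw [if_neg h]; exact ih _ (PySem.Set.nodup_add s a hs)

lemma length_discard (a : Int) : ∀ (s : List Int), s.Nodup → a ∈ s →
    (PySem.Set.discard s a).length + 1 = s.length := by
  intro s
  induction s with
  | nil => intro _ hm; simp at hm
  | cons b l ih =>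
    intro hs hm
    simp only [List.nodup_cons] at hs
    by_cases hb : b = a
    · subst hb
      have hd : PySem.Set.discard (b :: l) b = l := by
        simp only [PySem.Set.discard, List.filter_cons, beq_self_eq_true, Bool.not_true,
          Bool.false_eq_true, ite_false]
        rw [List.filter_eq_self]
        intro y hy
        simp only [Bool.not_eq_true', beq_eq_false_iff_ne, ne_eq]
        exact fun e => hs.1 (e ▸ hy)
      rw [hd, List.length_cons]
    · have hm' : a ∈ l := by
        rcases List.mem_cons.mp hm with rfl | hm'
        · exact absurd rfl hb
        · exact hm'
      have hd : PySem.Set.discard (b :: l) a = b :: PySem.Set.discard l a := by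
        simp only [PySem.Set.discard, List.filter_cons]
        rw [if_pos (by simp [hb])]
      rw [hd, List.length_cons, List.length_cons, ih hs.2 hm']

lemma mem_pvTog (v : Int) : ∀ (l : List Int) (s : PySem.Set Int),
    v ∈ pvTog l s ↔ (List.count v l % 2 = 1 ↔ v ∉ s) := by
  intro l
  induction l with
  | nil => intro s; simp [pvTog]
  | cons a l ih =>
    intro s
    simp only [pvTog]
    by_cases has : a ∈ s
    · rw [if_pos has, ih]
      rcases eq_or_ne v a with rfl | hva
      · rw [List.count_cons_self]
        simp only [PySem.Set.mem_discard, ne_eq, not_and, not_not]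
        rcases Nat.mod_two_eq_zero_or_one (List.count v l) with hk | hk <;>
          simp [Nat.succ_mod_two_eq_one_iff, hk, has]
      · simp only [List.count_cons, beq_iff_eq, Ne.symm hva, ite_false, if_false, add_zero]
        simp only [PySem.Set.mem_discard, ne_eq]
        tauto
    · rw [if_neg has, ih]
      rcases eq_or_ne v a with rfl | hva
      · rw [List.count_cons_self]
        simp only [PySem.Set.mem_add, ne_eq]
        rcases Nat.mod_two_eq_zero_or_one (List.count v l) with hk | hk <;>
          simp [Nat.succ_mod_two_eq_one_iff, hk, has]
      · simp only [List.count_cons, beq_iff_eq, Ne.symm hva, ite_false, if_false, add_zero]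
        simp only [PySem.Set.mem_add, ne_eq]
        tauto

lemma pvLoopB_char : ∀ (l : List Int) (s : PySem.Set Int) (c : Int), s.Nodup →
    pvLoopB l s c * 2 + ((pvTog l s).length : Int) = c * 2 + (l.length : Int) + (s.length : Int) := by
  intro l
  induction l with
  | nil => intro s c _; simp [pvLoopB, pvTog]
  | cons a l ih =>
    intro s c hs
    simp only [pvLoopB, pvTog, PySem.Set.contains, List.contains_iff_mem]
    by_cases has : a ∈ s
    · rw [if_pos has, if_pos (by simpa using has)]
      have hlen := length_discard a s hs has
      have h2 := ih (s.discard a) (c + 1) (PySem.Set.nodup_discard s a hs)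
      simp only [List.length_cons]
      push_cast at h2 ⊢
      omega
    · rw [if_neg has, if_neg (by simpa using has)]
      have hadd : PySem.Set.add s a = s ++ [a] := by
        simp only [PySem.Set.add, PySem.Set.contains, List.contains_iff_mem]
        rw [if_neg (by simpa using has)]
      have h2 := ih (s.add a) c (PySem.Set.nodup_add s a hs)
      rw [hadd] at h2 ⊢
      simp only [List.length_append, List.length_cons, List.length_nil] at h2
      simp only [List.length_cons]
      push_cast at h2 ⊢
      omega

lemma pvEntry_char (ar : List Int) (v : Int) :
    pvEntry ar v * 2 + (if List.count v ar % 2 = 1 then 1 else 0) = (List.count v ar : Int) := by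
  unfold pvEntry
  rw [PySem.List.count_eq, PySem.Int.floordiv_eq_ediv_of_pos (by norm_num)]
  split_ifs with h <;> omega

lemma sumA (ar : List Int) : ∀ (F : List Int),
    (F.map (pvEntry ar)).sum * 2 + ((F.filter (fun v => decide (List.count v ar % 2 = 1))).length : Int)
      = (F.map (fun v => (List.count v ar : Int))).sum := by
  intro F
  induction F with
  | nil => simp
  | cons a F ih =>
    simp only [List.map_cons, List.sum_cons, List.filter_cons]
    by_cases h : List.count a ar % 2 = 1
    · rw [if_pos (by simpa using h), List.length_cons]
      have hc := pvEntry_char ar a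
      rw [if_pos h] at hc
      push_cast
      omega
    · rw [if_neg (by simpa using h)]
      have hc := pvEntry_char ar a
      rw [if_neg h] at hc
      omega

lemma perm_firsts_dedup (ar : List Int) : (pvFirsts ar []).Perm ar.dedup := by
  rw [List.perm_ext_iff_of_nodup (nodup_pvFirsts ar []) (List.nodup_dedup ar)]
  intro v
  simp [mem_pvFirsts, List.mem_dedup]

lemma sumCount (ar : List Int) :
    ((pvFirsts ar []).map (fun v => (List.count v ar : Int))).sum = (ar.length : Int) := by
  have hp := (perm_firsts_dedup ar).map (fun v => (List.count v ar : Int))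
  rw [hp.sum_eq]
  have hm : (ar.dedup.map (fun v => (List.count v ar : Int)))
      = (ar.dedup.map (fun v => List.count v ar)).map (fun n : Nat => (n : Int)) := by
    rw [List.map_map]; rfl
  rw [hm, ← Nat.cast_list_sum, List.sum_map_count_dedup_eq_length ar]

lemma oddLen (ar : List Int) :
    (((pvFirsts ar []).filter (fun v => decide (List.count v ar % 2 = 1))).length : Int)
      = ((pvTog ar PySem.Set.empty).length : Int) := by
  have hperm : ((pvFirsts ar []).filter (fun v => decide (List.count v ar % 2 = 1))).Perm
      (pvTog ar PySem.Set.empty) := by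
    rw [List.perm_ext_iff_of_nodup ((nodup_pvFirsts ar []).filter _)
      (nodup_pvTog ar PySem.Set.empty List.nodup_nil)]
    intro v
    rw [List.mem_filter, mem_pvFirsts, mem_pvTog]
    simp only [PySem.Set.empty, List.not_mem_nil, not_false_iff, iff_true, decide_eq_true_eq,
      and_true]
    constructor
    · exact fun h => h.2
    · exact fun hodd => ⟨List.count_pos_iff.mp (by omega), hodd⟩
  rw [hperm.length_eq]

-- ===== VERDICT (by name: the statement is the Claim_ definition above) =====
theorem sockMerchant_spec : Claim_equal_sockMerchant := by
  unfold Claim_equal_sockMerchant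
  intro n ar _
  unfold Spec_sockMerchant sockMerchant_alt
  rw [sockMerchant_val]
  have hB := pvLoopB_char ar PySem.Set.empty 0 List.nodup_nil
  have hA := sumA ar (pvFirsts ar [])
  rw [sumCount ar] at hA
  have hO := oddLen ar
  simp only [PySem.Set.empty, List.length_nil, Nat.cast_zero] at hB hO ⊢
  omega
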